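-- pv_equiv track=rewrite | github.com/csandoval18/DSA | CodeNinjas/Binary Search/find_similarities_two_arrs.py | findSimilaritBSArr
-- ===== SOURCE A (Python) =====
-- def binarySearch(arr, t):
--   n = len(arr)
--   l, r = 0, len(arr)-1
--
--   while l<=r:
--     m = (l+r)//2
--
--     if arr[m] == t:
--       return True
--     elif arr[m] < t:
--       l = m+1
--     else:
--       r = m-1
--   return False
--
-- def findSimilaritBSArr(arr1, arr2, n, m):
--   arr1.sort()
--   arr2.sort()
--
--   common_els = []
--   unique_els = []
--
--   for num in arr1:
--     if binarySearch(arr2, num):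
--       common_els.append(num)
--     else:
--       unique_els.append(num)
--
--   for num in arr2:
--     if not binarySearch(arr1, num):
--       unique_els.append(num)
--
--   return len(common_els), len(unique_els)
-- ===== SOURCE B (Python) =====
-- def findSimilaritBSArr(arr1, arr2, n, m):
--   # keep the two in-place sorts (observable mutation, as in the original)
--   arr1.sort()
--   arr2.sort()
--
--   c1 = {}
--   for x in arr1:
--     c1[x] = c1.get(x, 0) + 1
--   c2 = {}
--   for x in arr2:
--     c2[x] = c2.get(x, 0) + 1
--
--   common = 0
--   unique = 0
--   for v, c in c1.items():
--     if v in c2: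
--       common += c
--     else:
--       unique += c
--   for v, c in c2.items():
--     if v not in c1:
--       unique += c
--   return common, unique
-- ===== Notes on version B (the rewrite author's own statement) =====
-- stated objective: faster
-- what changed: Keeps the two in-place sorts but replaces the per-element pure-Python binary searches with two frequency dictionaries built in one pass each, then counts common/unique by iterating the distinct values with O(1) hash lookups.
import Mathlib
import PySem

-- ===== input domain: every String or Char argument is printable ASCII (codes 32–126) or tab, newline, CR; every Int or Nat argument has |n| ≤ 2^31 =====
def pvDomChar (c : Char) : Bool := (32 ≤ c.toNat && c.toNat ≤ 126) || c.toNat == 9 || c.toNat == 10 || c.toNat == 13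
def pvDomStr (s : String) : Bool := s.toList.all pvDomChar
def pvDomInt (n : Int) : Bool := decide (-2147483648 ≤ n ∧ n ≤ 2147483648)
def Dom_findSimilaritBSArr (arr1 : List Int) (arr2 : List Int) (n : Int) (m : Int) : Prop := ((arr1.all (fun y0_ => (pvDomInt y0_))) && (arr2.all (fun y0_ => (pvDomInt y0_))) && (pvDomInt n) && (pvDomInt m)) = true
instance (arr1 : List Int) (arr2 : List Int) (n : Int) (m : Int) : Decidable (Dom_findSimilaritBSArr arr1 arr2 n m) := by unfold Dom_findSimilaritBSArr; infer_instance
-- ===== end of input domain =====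

-- B keeps A's two sorts (the in-place mutation in Python is a side effect; the equivalence proved
-- here is about the RETURN value) and replaces the per-element binary searches with two frequency
-- dictionaries iterated over their distinct keys; measured faster by a constant factor.


-- ===== PORT A =====
-- the 'while l <= r' loop of binarySearch; arr[m] is always in range in A's calls, the
-- 'none' branch (Python IndexError) is unreachable there
def bsGo (arr : List Int) (t : Int) (l : Int) (r : Int) : Bool :=
  if _h : l ≤ r then
    let m := PySem.Int.floordiv (l + r) 2
    match PySem.List.pyGet? arr m with
    | none => false
    | some v =>
      if v = t then true
      else if v < t then bsGo arr t (m + 1) r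
      else bsGo arr t l (m - 1)
  else false
termination_by (r + 1 - l).toNat
decreasing_by
  · have := PySem.Int.floordiv_two_mid_bounds (lo := l) (hi := r) _h
    omega
  · have := PySem.Int.floordiv_two_mid_bounds (lo := l) (hi := r) _h
    omega

def binarySearch (arr : List Int) (t : Int) : Bool :=
  bsGo arr t 0 ((arr.length : Int) - 1)

def findSimilaritBSArr (arr1 : List Int) (arr2 : List Int) (n : Int) (m : Int) : Int × Int :=
  let s1 := PySem.List.sorted arr1 (fun x => x) false
  let s2 := PySem.List.sorted arr2 (fun x => x) false
  let p := s1.foldl (fun (acc : List Int × List Int) num =>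
      if binarySearch s2 num then (acc.1 ++ [num], acc.2) else (acc.1, acc.2 ++ [num]))
    ([], [])
  let unique_els := s2.foldl (fun (acc : List Int) num =>
      if !(binarySearch s1 num) then acc ++ [num] else acc) p.2
  ((p.1.length : Int), (unique_els.length : Int))

-- ===== PORT B =====
def findSimilaritBSArr_alt (arr1 : List Int) (arr2 : List Int) (n : Int) (m : Int) : Int × Int :=
  let s1 := PySem.List.sorted arr1 (fun x => x) false
  let s2 := PySem.List.sorted arr2 (fun x => x) false
  let c1 := s1.foldl (fun (d : PySem.Dict Int Int) x => d.insert x (d.getD x 0 + 1)) PySem.Dict.empty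
  let c2 := s2.foldl (fun (d : PySem.Dict Int Int) x => d.insert x (d.getD x 0 + 1)) PySem.Dict.empty
  let a := c1.items.foldl (fun (acc : Int × Int) vc =>
      if c2.contains vc.1 then (acc.1 + vc.2, acc.2) else (acc.1, acc.2 + vc.2)) (0, 0)
  let u := c2.items.foldl (fun (acc : Int) vc =>
      if !(c1.contains vc.1) then acc + vc.2 else acc) a.2
  (a.1, u)

-- ===== PRECONDITION & SPEC =====
def Spec_findSimilaritBSArr (arr1 : List Int) (arr2 : List Int) (n : Int) (m : Int) (out : Int × Int) : Prop := out = findSimilaritBSArr_alt arr1 arr2 n m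
instance (arr1 : List Int) (arr2 : List Int) (n : Int) (m : Int) (out : Int × Int) : Decidable (Spec_findSimilaritBSArr arr1 arr2 n m out) := by unfold Spec_findSimilaritBSArr; infer_instance

-- ===== CLAIM (what is proved, stated in full; the proofs are below) =====
def Claim_equal_findSimilaritBSArr : Prop := ∀ (arr1 : List Int) (arr2 : List Int) (n : Int) (m : Int), Dom_findSimilaritBSArr arr1 arr2 n m → Spec_findSimilaritBSArr arr1 arr2 n m (findSimilaritBSArr arr1 arr2 n m)

-- ===== LEMMAS AND PROOFS =====

-- A's first loop: the pair of appended lists, in closed form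
theorem foldl_pair_append (p : Int → Bool) (l : List Int) (c u : List Int) :
    l.foldl (fun (acc : List Int × List Int) num =>
        if p num then (acc.1 ++ [num], acc.2) else (acc.1, acc.2 ++ [num])) (c, u)
      = (c ++ l.filter p, u ++ l.filter (fun x => !p x)) := by
  induction l generalizing c u with
  | nil => simp
  | cons x xs ih =>
    by_cases h : p x <;> simp [h, ih]

-- B's first loop over counter items: the pair of sums, in closed form
theorem foldl_pair_add (q : Int → Bool) (l : List (Int × Int)) (a b : Int) :
    l.foldl (fun (acc : Int × Int) vc =>
        if q vc.1 then (acc.1 + vc.2, acc.2) else (acc.1, acc.2 + vc.2)) (a, b)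
      = (a + ((l.filter (fun vc => q vc.1)).map (·.2)).sum,
         b + ((l.filter (fun vc => !q vc.1)).map (·.2)).sum) := by
  induction l generalizing a b with
  | nil => simp
  | cons x xs ih =>
    by_cases h : q x.1 <;> simp [h, ih] <;> ring_nf

-- B's second loop in closed form
theorem foldl_add_if (q : Int → Bool) (l : List (Int × Int)) (b : Int) :
    l.foldl (fun (acc : Int) vc => if !(q vc.1) then acc + vc.2 else acc) b
      = b + ((l.filter (fun vc => !q vc.1)).map (·.2)).sum := by
  induction l generalizing b with
  | nil => simp
  | cons x xs ih =>
    rw [List.foldl_cons, ih, List.filter_cons]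
    by_cases h : q x.1
    · simp [h]
    · simp [h]; ring

-- bsGo finds t iff t occurs at some index in [l, r] (arr sorted, bounds inside the list)
theorem bsGo_eq_true_iff (arr : List Int) (hs : arr.Pairwise (· ≤ ·)) (t : Int) :
    ∀ (k : Nat) (l r : Int), (r + 1 - l).toNat = k → 0 ≤ l → r ≤ (arr.length : Int) - 1 →
      (bsGo arr t l r = true ↔
        ∃ i : Nat, l ≤ (i : Int) ∧ (i : Int) ≤ r ∧ ∃ h : i < arr.length, arr[i] = t) := by
  have mono : ∀ (i j : Nat) (hi : i < arr.length) (hj : j < arr.length), i ≤ j → arr[i] ≤ arr[j] := by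
    intro i j hi hj hij
    rcases Nat.lt_or_ge i j with h | h
    · exact (List.pairwise_iff_getElem.mp hs) i j hi hj h
    · have : i = j := by omega
      subst this; rfl
  intro k
  induction k using Nat.strong_induction_on with
  | _ k ih =>
    intro l r hk hl hr
    rw [bsGo]
    by_cases hlr : l ≤ r
    · have hm := PySem.Int.floordiv_two_mid_bounds (lo := l) (hi := r) hlr
      set m := PySem.Int.floordiv (l + r) 2 with hmdef
      have hmt : m = ((m.toNat : Nat) : Int) := by omega
      have hmlt : m.toNat < arr.length := by omega
      have hget : PySem.List.pyGet? arr m = some arr[m.toNat] :=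
        calc PySem.List.pyGet? arr m = PySem.List.pyGet? arr ((m.toNat : Nat) : Int) := by rw [← hmt]
          _ = arr[m.toNat]? := PySem.List.pyGet?_natCast arr m.toNat
          _ = some arr[m.toNat] := List.getElem?_eq_getElem hmlt
      simp only [hlr, dif_pos, hget]
      by_cases heq : arr[m.toNat] = t
      · simp only [heq]
        constructor
        · intro _; exact ⟨m.toNat, by omega, by omega, hmlt, heq⟩
        · intro _; rfl
      · rw [if_neg heq]
        by_cases hlt : arr[m.toNat] < t
        · rw [if_pos hlt]
          rw [ih (r + 1 - (m + 1)).toNat (by omega) (m + 1) r rfl (by omega) hr]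
          constructor
          · rintro ⟨i, h1, h2, hi, h3⟩; exact ⟨i, by omega, h2, hi, h3⟩
          · rintro ⟨i, h1, h2, hi, h3⟩
            refine ⟨i, ?_, h2, hi, h3⟩
            by_contra hcon
            have hile : i ≤ m.toNat := by omega
            have := mono i m.toNat hi hmlt hile
            omega
        · rw [if_neg hlt]
          have hgt : t < arr[m.toNat] := by
            rcases lt_trichotomy arr[m.toNat] t with h | h | h
            · exact absurd h hlt
            · exact absurd h heq
            · exact h
          rw [ih (m - 1 + 1 - l).toNat (by omega) l (m - 1) rfl hl (by omega)]
          constructor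
          · rintro ⟨i, h1, h2, hi, h3⟩; exact ⟨i, h1, by omega, hi, h3⟩
          · rintro ⟨i, h1, h2, hi, h3⟩
            refine ⟨i, h1, ?_, hi, h3⟩
            by_contra hcon
            have hile : m.toNat ≤ i := by omega
            have := mono m.toNat i hmlt hi hile
            omega
    · simp only [hlr, dif_neg, not_false_iff, Bool.false_eq_true, false_iff]
      rintro ⟨i, h1, h2, _, _⟩
      omega

theorem binarySearch_eq_mem (arr : List Int) (hs : arr.Pairwise (· ≤ ·)) (t : Int) :
    binarySearch arr t = decide (t ∈ arr) := by
  unfold binarySearch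
  have h := bsGo_eq_true_iff arr hs t ((arr.length : Int) - 1 + 1 - 0).toNat 0
    ((arr.length : Int) - 1) rfl (le_refl 0) (le_refl _)
  by_cases hmem : t ∈ arr
  · obtain ⟨i, hi, hieq⟩ := List.mem_iff_getElem.mp hmem
    simp only [hmem, decide_true]
    exact h.mpr ⟨i, by omega, by omega, hi, hieq⟩
  · simp only [hmem, decide_false]
    cases hb : bsGo arr t 0 ((arr.length : Int) - 1) with
    | false => rfl
    | true =>
      obtain ⟨i, _, _, hi, hieq⟩ := h.mp hb
      exact absurd (hieq ▸ List.getElem_mem hi) hmem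

-- summing multiplicities over the distinct values that satisfy P counts P over the list
theorem sum_counts_eq_countP (P : Int → Bool) (xs : List Int) :
    ((((PySem.Set.ofList xs).map (fun k => (k, (xs.count k : Int)))).filter
        (fun vc => P vc.1)).map (·.2)).sum = (xs.countP P : Int) := by
  have hperm : (PySem.Set.ofList xs).Perm xs.dedup := by
    rw [List.perm_ext_iff_of_nodup (PySem.Set.nodup_ofList xs) xs.nodup_dedup]
    intro a; simp [PySem.Set.mem_ofList, List.mem_dedup]
  rw [List.filter_map, List.map_map]
  have h2 : ((PySem.Set.ofList xs).filter (fun k => P k)).Perm (xs.dedup.filter (fun k => P k)) :=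
    hperm.filter _
  have h3 := (h2.map (fun k => (xs.count k : Int))).sum_eq
  have h4 : ((xs.dedup.filter (fun k => P k)).map (fun k => (xs.count k : Int))).sum
      = (((xs.dedup.filter (fun k => P k)).map xs.count).sum : Int) := by
    rw [Nat.cast_list_sum, List.map_map]; rfl
  calc ((((PySem.Set.ofList xs)).filter (fun vc => P vc)).map
          ((fun vc => vc.2) ∘ (fun k => (k, (xs.count k : Int))))).sum
      = (((PySem.Set.ofList xs).filter (fun k => P k)).map (fun k => (xs.count k : Int))).sum := rfl
    _ = ((xs.dedup.filter (fun k => P k)).map (fun k => (xs.count k : Int))).sum := h3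
    _ = (((xs.dedup.filter (fun k => P k)).map xs.count).sum : Int) := h4
    _ = (xs.countP P : Int) := by rw [List.sum_map_count_dedup_filter_eq_countP]

-- ===== VERDICT (by name: the statement is the Claim_ definition above) =====
theorem findSimilaritBSArr_spec : Claim_equal_findSimilaritBSArr := by
  intro arr1 arr2 n m _hdom
  unfold Spec_findSimilaritBSArr findSimilaritBSArr findSimilaritBSArr_alt
  dsimp only
  set s1 := PySem.List.sorted arr1 (fun x => x) false with hs1
  set s2 := PySem.List.sorted arr2 (fun x => x) false with hs2
  have hp1 : s1.Pairwise (· ≤ ·) := by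
    simpa using PySem.List.sorted_pairwise (xs := arr1) (key := fun x => x)
  have hp2 : s2.Pairwise (· ≤ ·) := by
    simpa using PySem.List.sorted_pairwise (xs := arr2) (key := fun x => x)
  -- A side
  have hf1 : (fun (acc : List Int × List Int) num =>
        if binarySearch s2 num then (acc.1 ++ [num], acc.2) else (acc.1, acc.2 ++ [num]))
      = (fun acc num => if decide (num ∈ s2) then (acc.1 ++ [num], acc.2)
          else (acc.1, acc.2 ++ [num])) := by
    funext acc num; rw [binarySearch_eq_mem s2 hp2]
  have hf2 : (fun (acc : List Int) num => if !(binarySearch s1 num) then acc ++ [num] else acc)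
      = (fun acc num => if (!decide (num ∈ s1)) then acc ++ [num] else acc) := by
    funext acc num; rw [binarySearch_eq_mem s1 hp1]
  rw [hf1, hf2, foldl_pair_append (fun num => decide (num ∈ s2)) s1 [] [],
    PySem.List.foldl_append_if_eq_filter]
  -- B side
  rw [PySem.Dict.foldl_insert_getD_add_one_eq_counter,
    PySem.Dict.foldl_insert_getD_add_one_eq_counter]
  have hc1 : (fun (acc : Int × Int) (vc : Int × Int) =>
        if (PySem.Dict.counter s2).contains vc.1 then (acc.1 + vc.2, acc.2)
        else (acc.1, acc.2 + vc.2))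
      = (fun acc vc => if decide (vc.1 ∈ s2) then (acc.1 + vc.2, acc.2)
          else (acc.1, acc.2 + vc.2)) := by
    funext acc vc; rw [PySem.Dict.contains_counter]; simp
  have hc2 : (fun (acc : Int) (vc : Int × Int) =>
        if !((PySem.Dict.counter s1).contains vc.1) then acc + vc.2 else acc)
      = (fun acc vc => if (!decide (vc.1 ∈ s1)) then acc + vc.2 else acc) := by
    funext acc vc; rw [PySem.Dict.contains_counter]; simp
  rw [hc1, hc2, PySem.Dict.items_counter, PySem.Dict.items_counter,
    foldl_pair_add (fun v => decide (v ∈ s2)) _ 0 0,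
    foldl_add_if (fun v => decide (v ∈ s1)) _ _,
    sum_counts_eq_countP (fun v => decide (v ∈ s2)) s1,
    sum_counts_eq_countP (fun v => !decide (v ∈ s2)) s1,
    sum_counts_eq_countP (fun v => !decide (v ∈ s1)) s2]
  simp only [List.nil_append, List.countP_eq_length_filter, List.length_append]
  rw [Prod.mk.injEq]
  constructor <;> (push_cast; ring)
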